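-- pv_equiv track=rewrite | github.com/danielraffel/shipyard | src/shipyard/executor/clixml.py | _split_objs
-- ===== SOURCE A (Python) =====
-- def _split_objs(xml_blob: str) -> list[str]:
--     """Split a concatenation of ``<Objs>…</Objs>`` documents into a
--     list of individual XML strings. Returns ``[xml_blob]`` unchanged
--     when only one document is present; empty list when the blob is
--     empty or shaped wrong for recovery."""
--     out: list[str] = []
--     start = 0
--     while start < len(xml_blob):
--         open_idx = xml_blob.find("<Objs", start)
--         if open_idx < 0:
--             break
--         close_idx = xml_blob.find("</Objs>", open_idx)
--         if close_idx < 0: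
--             break
--         end = close_idx + len("</Objs>")
--         out.append(xml_blob[open_idx:end])
--         start = end
--     return out
-- ===== SOURCE B (Python) =====
-- def _split_objs(xml_blob: str) -> list[str]:
--     """Split on the closing tag once, then keep each piece that contains an
--     opening '<Objs', trimmed to start there, with its '</Objs>' re-attached."""
--     out: list[str] = []
--     for piece in xml_blob.split("</Objs>")[:-1]:
--         i = piece.find("<Objs")
--         if i >= 0:
--             out.append(piece[i:] + "</Objs>")
--     return out
-- ===== Notes on version B (the rewrite author's own statement) =====
-- stated objective: simpler
-- what changed: Replaces A's while-loop with an explicit start pointer and two find() calls per iteration by a single str.split on the closing tag followed by one filter-and-trim pass over the resulting pieces.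
import Mathlib
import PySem

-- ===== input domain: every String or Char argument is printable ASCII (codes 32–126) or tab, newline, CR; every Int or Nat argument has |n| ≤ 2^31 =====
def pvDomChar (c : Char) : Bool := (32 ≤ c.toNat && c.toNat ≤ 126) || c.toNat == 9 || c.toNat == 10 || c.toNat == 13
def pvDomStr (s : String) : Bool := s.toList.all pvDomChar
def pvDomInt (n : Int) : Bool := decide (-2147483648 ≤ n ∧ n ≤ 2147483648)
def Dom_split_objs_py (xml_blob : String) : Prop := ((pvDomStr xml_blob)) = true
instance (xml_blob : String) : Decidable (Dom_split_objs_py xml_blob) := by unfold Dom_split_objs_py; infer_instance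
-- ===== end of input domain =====

-- B replaces A's while-loop with start-pointer/find arithmetic by a single split on the closing
-- tag followed by a filter-and-trim pass over the pieces (objective: simpler; same return value).

-- the two tag literals both programs search for
def opTag : List Char := "<Objs".toList
def clTag : List Char := "</Objs>".toList

-- ===== PORT A =====
-- fact cited by A's loop termination proof: a successful find-from result is ≥ its start and ≤ len
theorem findFrom_bounds (s sub : List Char) (a : Int) (h0 : 0 ≤ a) (hl : a ≤ s.length)
    (h : ¬ PySem.Chars.findFrom s sub a < 0) :
    a ≤ PySem.Chars.findFrom s sub a ∧ PySem.Chars.findFrom s sub a ≤ s.length := by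
  have ha : a = ((a.toNat : Nat) : Int) := by omega
  have hk : a.toNat ≤ s.length := by omega
  rw [ha] at h ⊢
  rw [PySem.Chars.findFrom_natCast s sub a.toNat hk] at h ⊢
  split at h
  · omega
  · rename_i hne
    have h1 := PySem.Chars.find_le_length (List.drop a.toNat s) sub
    have h2 := PySem.Chars.neg_one_le_find (List.drop a.toNat s) sub
    simp only [List.length_drop] at h1
    constructor <;> [skip; skip] <;> simp only [if_neg hne] <;> omega

-- A's while loop, transliterated: start pointer, two finds, slice, append, advance
def splitObjsALoop (s : List Char) (start : Nat) (out : List String) : List String :=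
  if h : start < s.length then
    let openIdx := PySem.Chars.findFrom s opTag (start : Int)
    if hop : openIdx < 0 then out
    else
      let closeIdx := PySem.Chars.findFrom s clTag openIdx
      if hcl : closeIdx < 0 then out
      else
        let e := closeIdx + 7
        splitObjsALoop s e.toNat
          (out ++ [String.ofList (PySem.Chars.slice s (some openIdx) (some e))])
  else out
termination_by s.length - start
decreasing_by
  have h1 := findFrom_bounds s opTag (start : Int) (by omega) (by exact_mod_cast Nat.le_of_lt h) hop
  have h2 := findFrom_bounds s clTag (PySem.Chars.findFrom s opTag (start : Int)) (by omega)
    (by omega) hcl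
  omega

def split_objs_py (xml_blob : String) : List String :=
  splitObjsALoop xml_blob.toList 0 []

-- ===== PORT B =====
def split_objs_py_alt (xml_blob : String) : List String :=
  let parts := PySem.List.slice (PySem.Chars.splitOn xml_blob.toList clTag) none (some (-1))
  parts.foldl (fun out piece =>
    let i := PySem.Chars.find piece opTag
    if 0 ≤ i then out ++ [String.ofList (PySem.Chars.slice piece (some i) ++ clTag)] else out) []

-- ===== PRECONDITION & SPEC =====
def Spec_split_objs_py (xml_blob : String) (out : List String) : Prop := out = split_objs_py_alt xml_blob
instance (xml_blob : String) (out : List String) : Decidable (Spec_split_objs_py xml_blob out) := by unfold Spec_split_objs_py; infer_instance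

-- ===== CLAIM (what is proved, stated in full; the proofs are below) =====
def Claim_equal_split_objs_py : Prop := ∀ (xml_blob : String), Dom_split_objs_py xml_blob → Spec_split_objs_py xml_blob (split_objs_py xml_blob)

-- ===== LEMMAS AND PROOFS =====

-- common specification of both programs: a one-pass scanner; scanSp looks for the next "<Objs",
-- capSp then collects characters up to and including the next "</Objs>"
mutual
def scanSp : List Char → List (List Char)
  | [] => []
  | c :: rest => if opTag.isPrefixOf (c :: rest) then capSp (c :: rest) [] else scanSp rest
  termination_by l => (l.length, 1)
def capSp : List Char → List Char → List (List Char)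
  | [], _ => []
  | c :: rest, buf =>
    if clTag.isPrefixOf (c :: rest) then (buf ++ clTag) :: scanSp (List.drop 7 (c :: rest))
    else capSp rest (buf ++ [c])
  termination_by l _ => (l.length, 0)
end

-- splitOn, re-expressed without fuel or accumulators
def msp : List Char → List Char → List (List Char)
  | [], cur => [cur.reverse]
  | c :: rest, cur =>
    if clTag.isPrefixOf (c :: rest) then cur.reverse :: msp (List.drop 7 (c :: rest)) []
    else msp rest (c :: cur)
  termination_by l _ => l.length

theorem opTag_eq : opTag = ['<','O','b','j','s'] := by decide

theorem clTag_eq : clTag = ['<','/','O','b','j','s','>'] := by decide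

theorem splitOn_go_eq_msp (fuel : Nat) (l cur : List Char) (acc : List (List Char))
    (h : l.length < fuel) :
    PySem.Chars.splitOn.go clTag fuel l cur acc = acc.reverse ++ msp l cur := by
  induction fuel generalizing l cur acc with
  | zero => omega
  | succ fuel ih =>
    cases l with
    | nil => simp [PySem.Chars.splitOn.go, msp]
    | cons c rest =>
      rw [PySem.Chars.splitOn.go.eq_def]
      simp only []
      by_cases hp : clTag.isPrefixOf (c :: rest)
      · have hlen : clTag.length = 7 := rfl
        rw [if_pos hp, hlen, ih _ _ _ (by simp at h ⊢; omega)]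
        rw [msp, if_pos hp]
        simp
      · rw [if_neg hp, ih _ _ _ (by simp at h ⊢; omega), msp, if_neg hp]

theorem splitOn_eq_msp (l : List Char) :
    PySem.Chars.splitOn l clTag = msp l [] := by
  rw [PySem.Chars.splitOn, splitOn_go_eq_msp _ _ _ _ (by omega)]
  simp

theorem msp_ne_nil (l cur : List Char) : msp l cur ≠ [] := by
  induction l generalizing cur with
  | nil => simp [msp]
  | cons c rest ih =>
    rw [msp]
    split
    · simp
    · exact ih _

theorem scan_skip (m : Nat) (l : List Char)
    (h : ∀ k < m, ¬ opTag <+: List.drop k l) :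
    scanSp l = scanSp (List.drop m l) := by
  induction m generalizing l with
  | zero => simp
  | succ m ih =>
    cases l with
    | nil => simp
    | cons c rest =>
      have h0 : ¬ opTag.isPrefixOf (c :: rest) := by
        rw [List.isPrefixOf_iff_prefix]
        simpa using h 0 (by omega)
      rw [scanSp, if_neg h0]
      rw [ih rest (fun k hk => by simpa using h (k + 1) (by omega))]
      simp [List.drop_succ_cons]

theorem cap_skip (m : Nat) (l buf : List Char) (hm : m ≤ l.length)
    (h : ∀ k < m, ¬ clTag <+: List.drop k l) :
    capSp l buf = capSp (List.drop m l) (buf ++ List.take m l) := by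
  induction m generalizing l buf with
  | zero => simp
  | succ m ih =>
    cases l with
    | nil => simp at hm
    | cons c rest =>
      have h0 : ¬ clTag.isPrefixOf (c :: rest) := by
        rw [List.isPrefixOf_iff_prefix]
        simpa using h 0 (by omega)
      rw [capSp, if_neg h0]
      rw [ih rest (buf ++ [c]) (by simp at hm; omega) (fun k hk => by simpa using h (k + 1) (by omega))]
      simp

theorem cap_no_close (l buf : List Char) (h : ¬ clTag <:+: l) :
    capSp l buf = [] := by
  induction l generalizing buf with
  | nil => rw [capSp]
  | cons c rest ih =>
    have h0 : ¬ clTag.isPrefixOf (c :: rest) := by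
      rw [List.isPrefixOf_iff_prefix]
      exact fun hp => h hp.isInfix
    rw [capSp, if_neg h0]
    exact ih _ (fun hi => h (List.infix_cons hi))

theorem scan_no_open (l : List Char) (h : ¬ opTag <:+: l) :
    scanSp l = [] := by
  induction l with
  | nil => rw [scanSp]
  | cons c rest ih =>
    have h0 : ¬ opTag.isPrefixOf (c :: rest) := by
      rw [List.isPrefixOf_iff_prefix]
      exact fun hp => h hp.isInfix
    rw [scanSp, if_neg h0]
    exact ih (fun hi => h (List.infix_cons hi))

theorem scan_no_close (l : List Char) (h : ¬ clTag <:+: l) :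
    scanSp l = [] := by
  induction l with
  | nil => rw [scanSp]
  | cons c rest ih =>
    rw [scanSp]
    split
    · exact cap_no_close _ _ h
    · exact ih (fun hi => h (List.infix_cons hi))

theorem no_open_in_close (l : List Char) (j k : Nat) (hj : clTag <+: List.drop j l)
    (h1 : j ≤ k) (h2 : k < j + 7) : ¬ opTag <+: List.drop k l := by
  intro hk
  have hjl : j + 7 ≤ l.length := by
    have := hj.length_le
    simp [clTag_eq] at this
    omega
  have hcl : ∀ d, (hd : d < 7) → l[j + d]'(by omega) = clTag[d]'(by simp [clTag_eq]; omega) := by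
    intro d hd
    have := hj.getElem (i := d) (by simp [clTag_eq]; omega)
    rw [List.getElem_drop] at this
    exact this.symm
  have hop : ∀ d, (hd : d < 5) → (hdl : k + d < l.length) →
      l[k + d]'(hdl) = opTag[d]'(by simp [opTag_eq]; omega) := by
    intro d hd hdl
    have := hk.getElem (i := d) (by simp [opTag_eq]; omega)
    rw [List.getElem_drop] at this
    exact this.symm
  rcases Nat.eq_or_lt_of_le h1 with he | hlt
  · subst he
    have ha := hop 1 (by omega) (by omega)
    have hb := hcl 1 (by omega)
    rw [ha] at hb
    simp [opTag_eq, clTag_eq] at hb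
  · obtain ⟨d, hd1, hd7, rfl⟩ : ∃ d, 1 ≤ d ∧ d < 7 ∧ k = j + d := ⟨k - j, by omega, by omega, by omega⟩
    have ha := hop 0 (by omega) (by omega)
    have hb := hcl d hd7
    simp only [Nat.add_zero] at ha
    rw [ha] at hb
    interval_cases d <;> simp [opTag_eq, clTag_eq] at hb

theorem open_take_iff (l : List Char) (j k : Nat) (hj : clTag <+: List.drop j l) (hk : k < j) :
    (opTag <+: List.drop k (List.take j l)) ↔ (opTag <+: List.drop k l) := by
  have hjl : j + 7 ≤ l.length := by
    have := hj.length_le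
    simp [clTag_eq] at this
    omega
  rw [List.drop_take]
  constructor
  · intro h
    exact h.trans (List.take_prefix _ _)
  · intro h
    by_cases h5 : 5 ≤ j - k
    · rw [List.prefix_take_iff]
      exact ⟨h, by simp [opTag_eq]; omega⟩
    · exfalso
      -- straddle: opTag would have a '<' strictly after its head, which it does not
      obtain ⟨d, hd1, hd5, rfl⟩ : ∃ d, 1 ≤ d ∧ d < 5 ∧ j = k + d := ⟨j - k, by omega, by omega, by omega⟩
      have ha := h.getElem (i := d) (by simp [opTag_eq]; omega)
      rw [List.getElem_drop] at ha
      have hb := hj.getElem (i := 0) (by simp [clTag_eq])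
      rw [List.getElem_drop] at hb
      simp only [Nat.add_zero] at hb
      rw [← hb] at ha
      interval_cases d <;> simp [opTag_eq, clTag_eq] at ha

theorem msp_no_close (l cur : List Char) (h : ¬ clTag <:+: l) :
    msp l cur = [cur.reverse ++ l] := by
  induction l generalizing cur with
  | nil => simp [msp]
  | cons c rest ih =>
    rw [msp, if_neg (by rw [List.isPrefixOf_iff_prefix]; exact fun hp => h hp.isInfix)]
    rw [ih _ (fun hi => h (List.infix_cons hi))]
    simp

theorem msp_first (l : List Char) (j : Nat) (hj : clTag <+: List.drop j l)
    (hmin : ∀ k < j, ¬ clTag <+: List.drop k l) (cur : List Char) :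
    msp l cur = (cur.reverse ++ List.take j l) :: msp (List.drop (j + 7) l) [] := by
  induction j generalizing l cur with
  | zero =>
    cases l with
    | nil => simp [clTag_eq] at hj
    | cons c rest =>
      rw [msp, if_pos (by rw [List.isPrefixOf_iff_prefix]; simpa using hj)]
      simp
  | succ j ih =>
    cases l with
    | nil => simp [clTag_eq] at hj
    | cons c rest =>
      rw [msp, if_neg (by rw [List.isPrefixOf_iff_prefix]; simpa using hmin 0 (by omega))]
      rw [ih rest (by simpa using hj) (fun k hk => by simpa using hmin (k + 1) (by omega)) (c :: cur)]
      have hdr : j + 1 + 7 = (j + 7) + 1 := by omega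
      simp [hdr]

theorem scan_step (t : List Char) (i j : Nat)
    (hoi : opTag <+: List.drop i t) (homin : ∀ k < i, ¬ opTag <+: List.drop k t)
    (hcj : clTag <+: List.drop j (List.drop i t))
    (hcmin : ∀ k < j, ¬ clTag <+: List.drop k (List.drop i t)) :
    scanSp t = (List.take (j + 7) (List.drop i t)) ::
      scanSp (List.drop (j + 7) (List.drop i t)) := by
  rw [scan_skip i t homin]
  have hjlen : j ≤ (List.drop i t).length := by
    have := hcj.length_le
    simp [clTag_eq, List.length_drop] at this
    simp only [List.length_drop]
    omega
  have hsplit : List.take (j + 7) (List.drop i t)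
      = List.take j (List.drop i t) ++ clTag := by
    rw [List.take_add]
    congr 1
    have := (List.prefix_iff_eq_take.mp hcj)
    rw [show clTag.length = 7 from rfl] at this
    exact this.symm
  cases hu : List.drop i t with
  | nil => rw [hu] at hoi; simp [opTag_eq] at hoi
  | cons c r =>
    rw [← hu]
    have hne : List.drop i t ≠ [] := by rw [hu]; simp
    obtain ⟨c', r', hu'⟩ : ∃ c' r', List.drop i t = c' :: r' := ⟨c, r, hu⟩
    rw [hu', scanSp, if_pos (by rw [List.isPrefixOf_iff_prefix]; rw [← hu']; exact hoi), ← hu']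
    rw [cap_skip j (List.drop i t) [] hjlen hcmin]
    cases hv : List.drop j (List.drop i t) with
    | nil => rw [hv] at hcj; simp [clTag_eq] at hcj
    | cons d w =>
      rw [hv] at hcj
      rw [capSp, if_pos (by rw [List.isPrefixOf_iff_prefix]; exact hcj), ← hv]
      rw [List.drop_drop, hsplit]
      simp

-- B's trim-and-close of one piece, on char lists
def trimClose (p : List Char) : List Char :=
  List.drop (PySem.Chars.find p opTag).toNat p ++ clTag

theorem prefix_drop_infix (p x : List Char) (k : Nat) (h : x <+: List.drop k p) : x <:+: p :=
  h.isInfix.trans ((List.drop_suffix k p).isInfix)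

theorem msp_filter_eq_scan_aux (n : Nat) : ∀ l : List Char, l.length ≤ n →
    (((msp l []).dropLast.filter (fun p => decide (0 ≤ PySem.Chars.find p opTag))).map trimClose)
      = scanSp l := by
  induction n with
  | zero =>
    intro l hl
    have hnil : l = [] := by cases l with
      | nil => rfl
      | cons a t => simp at hl
    subst hnil
    rw [scanSp]
    simp [msp]
  | succ n ih =>
    intro l hl
    by_cases hin : clTag <:+: l
    · have hfo : PySem.Chars.find l clTag ≠ -1 := (PySem.Chars.find_ne_neg_one_iff _ _).mpr hin
      have h0 : 0 ≤ PySem.Chars.find l clTag := by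
        have := PySem.Chars.neg_one_le_find l clTag
        omega
      obtain ⟨hpref, hmin⟩ := PySem.Chars.find_spec (s := l) (sub := clTag) h0
      set j := (PySem.Chars.find l clTag).toNat with hj_def
      have hjl : j + 7 ≤ l.length := by
        have h7 := hpref.length_le
        rw [show clTag.length = 7 from rfl, List.length_drop] at h7
        omega
      rw [msp_first l j hpref hmin []]
      rw [List.dropLast_cons_of_ne_nil (msp_ne_nil _ _)]
      simp only [List.reverse_nil, List.nil_append]
      set p := List.take j l with hp_def
      have hplen : p.length = j := by
        rw [hp_def, List.length_take]
        omega
      have hdj : List.drop (j + 7) l = List.drop 7 (List.drop j l) := by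
        rw [List.drop_drop]
      by_cases hop : 0 ≤ PySem.Chars.find p opTag
      · rw [List.filter_cons_of_pos (by simpa using hop)]
        rw [List.map_cons]
        rw [ih _ (by rw [List.length_drop]; omega)]
        obtain ⟨hopref, homin⟩ := PySem.Chars.find_spec (s := p) (sub := opTag) hop
        set i := (PySem.Chars.find p opTag).toNat with hi_def
        have hij : i + 5 ≤ j := by
          have h5 := hopref.length_le
          rw [show opTag.length = 5 from rfl, List.length_drop, hplen] at h5
          have := PySem.Chars.find_le_length p opTag
          rw [hplen] at hplen
          omega
        have hiltj : i < j := by omega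
        have hopl : opTag <+: List.drop i l := by
          rw [← open_take_iff l j i hpref hiltj, ← hp_def]
          exact hopref
        have hominl : ∀ k < i, ¬ opTag <+: List.drop k l := by
          intro k hk hkp
          exact homin k hk (by
            rw [hp_def, open_take_iff l j k hpref (by omega)]
            exact hkp)
        have hcjl : clTag <+: List.drop (j - i) (List.drop i l) := by
          rw [List.drop_drop, show i + (j - i) = j by omega]
          exact hpref
        have hcminl : ∀ k < j - i, ¬ clTag <+: List.drop k (List.drop i l) := by
          intro k hk
          rw [List.drop_drop]
          exact hmin (i + k) (by omega)
        rw [scan_step l i (j - i) hopl hominl hcjl hcminl]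
        congr 1
        · -- take (j-i+7) (drop i l) = trimClose p
          rw [trimClose, ← hi_def]
          have h1 : List.drop i p = List.take (j - i) (List.drop i l) := by
            rw [hp_def, List.drop_take]
          have h2 : List.take (j - i + 7) (List.drop i l)
              = List.take (j - i) (List.drop i l) ++ List.take 7 (List.drop (j - i) (List.drop i l)) := by
            rw [← List.take_add]
          rw [h2, ← h1]
          congr 1
          rw [List.drop_drop, show i + (j - i) = j by omega]
          have := List.prefix_iff_eq_take.mp hpref
          rw [show clTag.length = 7 from rfl] at this
          exact this
        · rw [List.drop_drop, show i + (j - i + 7) = j + 7 by omega]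
      · rw [List.filter_cons_of_neg (by simpa using hop)]
        rw [ih _ (by rw [List.length_drop]; omega)]
        have hnoinp : ¬ opTag <:+: p := by
          intro hinf
          have := (PySem.Chars.find_ne_neg_one_iff p opTag).mpr hinf
          have h2 := PySem.Chars.neg_one_le_find p opTag
          omega
        rw [scan_skip (j + 7) l (by
          intro k hk
          by_cases hkj : k < j
          · intro hkp
            exact hnoinp (prefix_drop_infix p opTag k (by
              rw [hp_def, open_take_iff l j k hpref hkj]
              exact hkp))
          · exact no_open_in_close l j k hpref (by omega) (by omega))]
    · rw [msp_no_close l [] hin]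
      simp only [List.reverse_nil, List.nil_append, List.dropLast_singleton]
      rw [scan_no_close l hin]
      simp

theorem aloop_eq_scan_aux (n : Nat) : ∀ (s : List Char) (start : Nat) (out : List String),
    s.length - start ≤ n → start ≤ s.length →
    splitObjsALoop s start out = out ++ (scanSp (List.drop start s)).map String.ofList := by
  induction n with
  | zero =>
    intro s start out hn hle
    rw [splitObjsALoop, dif_neg (by omega)]
    have : start = s.length := by omega
    subst this
    rw [List.drop_length, scanSp]
    simp
  | succ n ih =>
    intro s start out hn hle
    by_cases hlt : start < s.length
    · rw [splitObjsALoop]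
      simp only [dif_pos hlt]
      have hff := PySem.Chars.findFrom_natCast s opTag start hle
      by_cases hfo : PySem.Chars.find (List.drop start s) opTag = -1
      · rw [hff, if_pos hfo]
        rw [dif_pos (by norm_num)]
        rw [scan_no_open _ (by
          rw [← PySem.Chars.isIn_eq_false_iff]
          rw [← Bool.not_eq_true]
          intro hin
          exact (PySem.Chars.find_ne_neg_one_iff _ _ |>.mpr
            ((PySem.Chars.isIn_iff_infix _ _).mp hin)) hfo)]
        simp
      · -- open found
        have h0 : 0 ≤ PySem.Chars.find (List.drop start s) opTag := by
          have := PySem.Chars.neg_one_le_find (List.drop start s) opTag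
          omega
        set fo := PySem.Chars.find (List.drop start s) opTag with hfo_def
        have hile : fo ≤ (List.drop start s).length := by
          have := PySem.Chars.find_le_length (List.drop start s) opTag
          omega
        obtain ⟨hpref, hmin⟩ := PySem.Chars.find_spec (s := List.drop start s) (sub := opTag) h0
        rw [hff, if_neg hfo]
        rw [dif_neg (by omega)]
        have hcast : (start : Int) + fo = ((start + fo.toNat : Nat) : Int) := by push_cast; omega
        have hlen2 : start + fo.toNat ≤ s.length := by
          simp only [List.length_drop] at hile
          omega
        have hff2 := PySem.Chars.findFrom_natCast s clTag (start + fo.toNat) hlen2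
        have hdd : List.drop (start + fo.toNat) s = List.drop fo.toNat (List.drop start s) := by
          rw [List.drop_drop]
        by_cases hfc : PySem.Chars.find (List.drop (start + fo.toNat) s) clTag = -1
        · rw [hcast, hff2, if_pos hfc]
          rw [dif_pos (by norm_num)]
          have hnoc : ¬ clTag <:+: List.drop fo.toNat (List.drop start s) := by
            rw [← hdd]
            exact fun hin => (PySem.Chars.find_ne_neg_one_iff _ _ |>.mpr hin) hfc
          rw [scan_skip fo.toNat _ hmin]
          cases hu : List.drop fo.toNat (List.drop start s) with
          | nil => rw [hu] at hpref; simp [opTag_eq] at hpref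
          | cons c r =>
            rw [scanSp, if_pos (by rw [List.isPrefixOf_iff_prefix, ← hu]; exact hpref), ← hu]
            rw [cap_no_close _ _ hnoc]
            simp
        · -- close found
          have h0c : 0 ≤ PySem.Chars.find (List.drop (start + fo.toNat) s) clTag := by
            have := PySem.Chars.neg_one_le_find (List.drop (start + fo.toNat) s) clTag
            omega
          set fc := PySem.Chars.find (List.drop (start + fo.toNat) s) clTag with hfc_def
          obtain ⟨hprefc, hminc⟩ := PySem.Chars.find_spec (s := List.drop (start + fo.toNat) s) (sub := clTag) h0c
          rw [hcast, hff2, if_neg hfc]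
          rw [dif_neg (by omega)]
          have hclen : fc.toNat + 7 ≤ (List.drop (start + fo.toNat) s).length := by
            have hl7 := hprefc.length_le
            rw [show clTag.length = 7 from rfl, List.length_drop, List.length_drop] at hl7
            simp only [List.length_drop]
            omega
          have hcast2 : ((start + fo.toNat : Nat) : Int) + fc + 7
              = ((start + fo.toNat + fc.toNat + 7 : Nat) : Int) := by push_cast; omega
          have htonat : (((start + fo.toNat : Nat) : Int) + fc + 7).toNat
              = start + fo.toNat + fc.toNat + 7 := by omega
          rw [htonat]
          have hslice : PySem.Chars.slice s (some ((start + fo.toNat : Nat) : Int))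
              (some (((start + fo.toNat : Nat) : Int) + fc + 7))
              = List.take (fc.toNat + 7) (List.drop fo.toNat (List.drop start s)) := by
            rw [hcast2]
            rw [PySem.Chars.slice_eq_listSlice]
            rw [PySem.List.slice_natCast]
            rw [← hdd]
            congr 1
            omega
          rw [hslice]
          rw [ih s (start + fo.toNat + fc.toNat + 7) _ (by omega) (by
            simp only [List.length_drop] at hclen
            omega)]
          rw [List.append_assoc]
          congr 1
          rw [scan_step (List.drop start s) fo.toNat fc.toNat hpref hmin
            (by rw [← hdd]; exact hprefc) (by rw [← hdd]; exact hminc)]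
          have hdd2 : List.drop (start + fo.toNat + fc.toNat + 7) s
              = List.drop (fc.toNat + 7) (List.drop fo.toNat (List.drop start s)) := by
            rw [List.drop_drop, List.drop_drop]
            congr 1
            omega
          rw [hdd2]
          simp
    · rw [splitObjsALoop, dif_neg hlt]
      have : start = s.length := by omega
      subst this
      rw [List.drop_length, scanSp]
      simp

theorem ports_eq (xml_blob : String) : split_objs_py xml_blob = split_objs_py_alt xml_blob := by
  rw [split_objs_py, split_objs_py_alt]
  rw [aloop_eq_scan_aux xml_blob.toList.length xml_blob.toList 0 [] (by omega) (by omega)]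
  simp only [List.drop_zero, List.nil_append]
  rw [PySem.List.slice_to_neg_one]
  rw [splitOn_eq_msp]
  rw [PySem.List.foldl_append_ite (fun piece => 0 ≤ PySem.Chars.find piece opTag)
    (fun piece => String.ofList (PySem.Chars.slice piece (some (PySem.Chars.find piece opTag)) ++ clTag))]
  rw [List.nil_append]
  rw [← msp_filter_eq_scan_aux xml_blob.toList.length _ (by omega), List.map_map]
  apply List.map_congr_left
  intro x hx
  rw [List.mem_filter] at hx
  have hpos : 0 ≤ PySem.Chars.find x opTag := by simpa using hx.2
  simp only [Function.comp, trimClose]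
  rw [PySem.Chars.slice_eq_listSlice, PySem.List.slice_from _ hpos]

-- ===== VERDICT (by name: the statement is the Claim_ definition above) =====
theorem split_objs_py_spec : Claim_equal_split_objs_py := by
  intro xml_blob _
  show split_objs_py xml_blob = split_objs_py_alt xml_blob
  exact ports_eq xml_blob
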